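-- pv_equiv track=rewrite | github.com/Weeks-UNC/RNAvigate | plottingTools.py | metric_abbreviate
-- ===== SOURCE A (Python) =====
-- def metric_abbreviate(num):
--     suffixes = {3:'k',
--                 6:'M',
--                 9:"G"}
--     s = str(num)
--     # replace trailing zeros with metric abbreviation
--     zero_count = len(s)-len(s.rstrip('0'))
--     suffix = ''
--     new_string = str(s)
--     for num_zeros in sorted(suffixes.keys()):
--         if num_zeros <= zero_count:
--             suffix = suffixes[num_zeros]
--             new_string = s[:-num_zeros]
--     new_string = new_string+suffix
--     return new_string
-- ===== SOURCE B (Python) =====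
-- def metric_abbreviate(num):
--     s = str(num)
--     zero_count = len(s) - len(s.rstrip('0'))
--     n = min(zero_count // 3, 3)
--     if n == 0:
--         return s
--     return s[:-3 * n] + ['', 'k', 'M', 'G'][n]
-- ===== Notes on version B (the rewrite author's own statement) =====
-- stated objective: simpler
-- what changed: Replaces the dict plus scan-and-overwrite loop over sorted suffix keys with a closed-form capped tier index (zero_count floor-divided by the suffix step) into a suffix list, returning the truncated string plus suffix directly.
import Mathlib
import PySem

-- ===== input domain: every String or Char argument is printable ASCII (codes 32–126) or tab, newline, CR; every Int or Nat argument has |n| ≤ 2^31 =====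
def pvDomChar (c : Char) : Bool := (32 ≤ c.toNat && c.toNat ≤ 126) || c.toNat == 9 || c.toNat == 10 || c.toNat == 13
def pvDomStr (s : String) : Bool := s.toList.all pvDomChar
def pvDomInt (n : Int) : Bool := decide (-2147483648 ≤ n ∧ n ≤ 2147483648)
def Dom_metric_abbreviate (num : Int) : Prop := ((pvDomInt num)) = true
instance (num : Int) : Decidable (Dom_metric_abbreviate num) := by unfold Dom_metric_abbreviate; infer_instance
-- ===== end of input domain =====

-- B replaces A's dict + scan-and-overwrite loop by a closed-form tier index into a suffix list (simpler, same cost).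

-- s.rstrip('0') on the char list (exact: drop '0' characters from the right end)
def pvRstrip0 (cs : List Char) : List Char := (cs.reverse.dropWhile (· == '0')).reverse

-- ===== PORT A =====
def metric_abbreviate (num : Int) : String :=
  let suffixes : PySem.Dict Int String :=
    ((PySem.Dict.empty.insert 3 "k").insert 6 "M").insert 9 "G"
  let s := (PySem.Int.toStr num).toList
  let zero_count : Nat := s.length - (pvRstrip0 s).length
  -- loop state: (suffix, new_string); suffixes[num_zeros] never misses, getD "" is exact here
  let res := (PySem.List.sorted suffixes.keys (fun x => x)).foldl
    (fun st num_zeros =>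
      if num_zeros ≤ (zero_count : Int) then
        ((suffixes.getD num_zeros "").toList, PySem.List.slice s none (some (-num_zeros)))
      else st) (([] : List Char), s)
  String.ofList (res.2 ++ res.1)

-- ===== PORT B =====
def metric_abbreviate_alt (num : Int) : String :=
  let s := (PySem.Int.toStr num).toList
  let zero_count : Nat := s.length - (pvRstrip0 s).length
  let n := min (zero_count / 3) 3
  if n = 0 then String.ofList s
  else String.ofList (PySem.List.slice s none (some (-(3 * (n : Int)))) ++
                  ([[], ['k'], ['M'], ['G']].getD n []))

-- ===== PRECONDITION & SPEC =====
def Spec_metric_abbreviate (num : Int) (out : String) : Prop := out = metric_abbreviate_alt num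
instance (num : Int) (out : String) : Decidable (Spec_metric_abbreviate num out) := by unfold Spec_metric_abbreviate; infer_instance

-- ===== CLAIM (what is proved, stated in full; the proofs are below) =====
def Claim_equal_metric_abbreviate : Prop := ∀ (num : Int), Dom_metric_abbreviate num → Spec_metric_abbreviate num (metric_abbreviate num)

-- ===== LEMMAS AND PROOFS =====

-- ===== VERDICT (by name: the statement is the Claim_ definition above) =====
theorem metric_abbreviate_spec : Claim_equal_metric_abbreviate := by
  intro num _
  unfold Spec_metric_abbreviate metric_abbreviate metric_abbreviate_alt
  have hsorted : PySem.List.sorted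
      (((PySem.Dict.empty.insert (3 : Int) "k").insert 6 "M").insert 9 "G").keys (fun x => x) = [3, 6, 9] := by
    decide
  simp only [hsorted, List.foldl]
  set s := (PySem.Int.toStr num).toList with hs
  set zc : Nat := s.length - (pvRstrip0 s).length with hzc
  by_cases h3 : (3 : Int) ≤ (zc : Nat)
  · by_cases h6 : (6 : Int) ≤ (zc : Nat)
    · by_cases h9 : (9 : Int) ≤ (zc : Nat)
      · have hn : min (zc / 3) 3 = 3 := by omega
        simp [h9, hn]
      · have hn : min (zc / 3) 3 = 2 := by omega
        have hget : (((PySem.Dict.empty.insert (3 : Int) "k").insert 6 "M").insert 9 "G").getD 6 "" = "M" := by decide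
        simp [h6, h9, hn, hget]
    · have h9 : ¬ (9 : Int) ≤ (zc : Nat) := by omega
      have hn : min (zc / 3) 3 = 1 := by omega
      have hget : (((PySem.Dict.empty.insert (3 : Int) "k").insert 6 "M").insert 9 "G").getD 3 "" = "k" := by decide
      simp [h3, h6, h9, hn, hget]
  · have h6 : ¬ (6 : Int) ≤ (zc : Nat) := by omega
    have h9 : ¬ (9 : Int) ≤ (zc : Nat) := by omega
    have hn : min (zc / 3) 3 = 0 := by omega
    simp [h3, h6, h9, hn]
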